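-- pv_equiv track=rewrite | github.com/ChrysalisSC/Staravian | backend/utilities/users.py | get_xp_needed
-- ===== SOURCE A (Python) =====
-- def get_xp_needed(level):
--     if level is None or level < 0:
--         return 1
--     total_xp = 0
--     xp_threshold = 100
--     xp_increment = 100
--
--     for lvl in range(1, level + 1):
--         total_xp += xp_threshold
--         xp_threshold += xp_increment
--
--     return total_xp
-- ===== SOURCE B (Python) =====
-- def get_xp_needed(level):
--     if level is None or level < 0:
--         return 1
--     return 50 * level * (level + 1)
-- ===== Notes on version B (the rewrite author's own statement) =====
-- stated objective: faster
-- what changed: Replaced the O(level) accumulation loop with the closed-form arithmetic-series sum 50*level*(level+1).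
import Mathlib
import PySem

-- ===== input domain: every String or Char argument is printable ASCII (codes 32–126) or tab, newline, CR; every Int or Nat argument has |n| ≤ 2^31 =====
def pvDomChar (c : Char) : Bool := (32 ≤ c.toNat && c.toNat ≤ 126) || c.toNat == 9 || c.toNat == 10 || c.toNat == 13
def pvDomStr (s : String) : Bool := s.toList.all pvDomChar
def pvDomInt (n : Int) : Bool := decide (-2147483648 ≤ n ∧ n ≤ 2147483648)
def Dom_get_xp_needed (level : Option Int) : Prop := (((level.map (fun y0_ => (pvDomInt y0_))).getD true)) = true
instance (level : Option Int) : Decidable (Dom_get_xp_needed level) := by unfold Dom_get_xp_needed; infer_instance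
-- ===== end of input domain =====

-- B replaces A's O(level) accumulation loop with the closed-form sum 50*level*(level+1); return value only.

-- ===== PORT A =====
def get_xp_needed (level : Option Int) : Int :=
  match level with
  | none => 1
  | some l =>
    if l < 0 then 1
    else
      -- total_xp, xp_threshold accumulated over range(1, level+1); xp_increment is the constant 100
      let s := (PySem.List.pyRange 1 (l + 1) 1).foldl
        (fun (st : Int × Int) _ => (st.1 + st.2, st.2 + 100)) (0, 100)
      s.1

-- ===== PORT B =====
def get_xp_needed_alt (level : Option Int) : Int :=
  match level with
  | none => 1
  | some l => if l < 0 then 1 else 50 * l * (l + 1)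

-- ===== PRECONDITION & SPEC =====
def Spec_get_xp_needed (level : Option Int) (out : Int) : Prop := out = get_xp_needed_alt level
instance (level : Option Int) (out : Int) : Decidable (Spec_get_xp_needed level out) := by unfold Spec_get_xp_needed; infer_instance

-- ===== CLAIM (what is proved, stated in full; the proofs are below) =====
def Claim_equal_get_xp_needed : Prop := ∀ (level : Option Int), Dom_get_xp_needed level → Spec_get_xp_needed level (get_xp_needed level)

-- ===== LEMMAS AND PROOFS =====
theorem xp_loop_closed (n : Nat) :
    (PySem.List.pyRange 1 ((n : Int) + 1) 1).foldl
      (fun (st : Int × Int) _ => (st.1 + st.2, st.2 + 100)) (0, 100)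
      = (50 * (n : Int) * ((n : Int) + 1), 100 * ((n : Int) + 1)) := by
  induction n with
  | zero => simp [PySem.List.pyRange_one_eq_nil]
  | succ k ih =>
    have h : (1 : Int) ≤ (k : Int) + 1 := by omega
    have hs : ((k + 1 : Nat) : Int) + 1 = ((k : Int) + 1) + 1 := by push_cast; ring
    rw [hs, PySem.List.pyRange_one_succ_right h, List.foldl_append, ih]
    simp only [List.foldl_cons, List.foldl_nil]
    push_cast
    exact Prod.ext (by ring) (by ring)

-- ===== VERDICT (by name: the statement is the Claim_ definition above) =====
theorem get_xp_needed_spec : Claim_equal_get_xp_needed := by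
  intro level _
  unfold Spec_get_xp_needed get_xp_needed get_xp_needed_alt
  match level with
  | none => rfl
  | some l =>
    simp only
    by_cases h : l < 0
    · simp [h]
    · have hl : l = ((l.toNat : Nat) : Int) := by omega
      rw [if_neg h, hl, xp_loop_closed, if_neg (by omega : ¬ ((l.toNat : Int) < 0))]
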